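-- pv_equiv track=rewrite | github.com/aciderix/Graph-Systems-Exploration | numerical_semigroups/phases/N1_enumerate.py | make_semigroup
-- ===== SOURCE A (Python) =====
-- from math import gcd, log2
-- from functools import reduce
--
-- def make_semigroup(generators, check_limit=200):
--     """Create a numerical semigroup from generators.
--     Returns the set of elements up to check_limit and the gap set."""
--     g = reduce(gcd, generators)
--     if g != 1:
--         raise ValueError(f"Generators {generators} have gcd {g} != 1, not a numerical semigroup")
--
--     elements = set()
--     elements.add(0)
--     for gen in generators:
--         new_elements = set()
--         for e in range(0, check_limit + 1):
--             if e in elements: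
--                 for k in range(1, (check_limit - e) // gen + 1):
--                     new_elements.add(e + k * gen)
--         elements.update(new_elements)
--
--     # Iterative closure
--     changed = True
--     while changed:
--         changed = False
--         new = set()
--         for a in elements:
--             for b in elements:
--                 s = a + b
--                 if s <= check_limit and s not in elements:
--                     new.add(s)
--                     changed = True
--         elements.update(new)
--
--     return frozenset(e for e in elements if e <= check_limit)
-- ===== SOURCE B (Python) =====
-- from math import gcd
-- from functools import reduce
--
-- def make_semigroup(generators, check_limit=200):
--     """Create a numerical semigroup from generators.
--     Returns the set of elements up to check_limit (single sieve pass)."""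
--     g = reduce(gcd, generators)
--     if g != 1:
--         raise ValueError(f"Generators {generators} have gcd {g} != 1, not a numerical semigroup")
--     reach = [True]  # reach[e] == e is representable; 0 always is
--     for e in range(1, check_limit + 1):
--         reach.append(any(0 < gen <= e and reach[e - gen] for gen in generators))
--     return frozenset(e for e in range(check_limit + 1) if reach[e])
-- ===== Notes on version B (the rewrite author's own statement) =====
-- stated objective: faster
-- what changed: Replaces A's per-generator multiple-enumeration plus quadratic fixed-point closure (repeated all-pairs sums until no change) with a single left-to-right sieve: e is representable iff reach[e-gen] for some positive generator, one DP pass over 0..check_limit.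
import Mathlib
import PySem

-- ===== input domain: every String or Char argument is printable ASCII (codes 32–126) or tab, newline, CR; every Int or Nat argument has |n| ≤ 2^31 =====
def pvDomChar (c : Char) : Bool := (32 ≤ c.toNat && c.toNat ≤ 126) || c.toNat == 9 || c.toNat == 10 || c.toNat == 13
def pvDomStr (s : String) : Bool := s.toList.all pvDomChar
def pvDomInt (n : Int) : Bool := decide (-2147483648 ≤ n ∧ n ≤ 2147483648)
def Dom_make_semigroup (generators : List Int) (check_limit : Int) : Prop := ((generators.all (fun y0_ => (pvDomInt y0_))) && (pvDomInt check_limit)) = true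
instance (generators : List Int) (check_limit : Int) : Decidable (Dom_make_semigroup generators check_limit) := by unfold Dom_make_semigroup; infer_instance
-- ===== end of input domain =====

-- B replaces A's multiple-enumeration + quadratic sum-closure fixed point by a single
-- left-to-right reachability sieve over 0..check_limit (measurably faster, asymptotic).
-- Both ports return the frozenset result as its canonical sorted element list
-- (Python's frozenset has no defined iteration order; results are compared as sets).


-- ===== PORT A =====
-- reduce(gcd, generators); Python raises TypeError on [], excluded by Pre_ (value unused there)
def pvGcdReduce (generators : List Int) : Int :=
  match generators with
  | [] => 0
  | h :: t => t.foldl (fun a b => (Int.gcd a b : Int)) h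

-- the inner two loops of A's first phase for one generator: new_elements
-- (Python raises ZeroDivisionError when gen = 0 — excluded by Pre_)
def pvAGenNew (elements : PySem.Set Int) (check_limit gen : Int) : PySem.Set Int :=
  (PySem.List.pyRange 0 (check_limit + 1) 1).foldl
    (fun ne e =>
      if e ∈ elements then
        (PySem.List.pyRange 1 (PySem.Int.floordiv (check_limit - e) gen + 1) 1).foldl
          (fun ne k => PySem.Set.add ne (e + k * gen)) ne
      else ne)
    PySem.Set.empty

-- A's first phase: for gen in generators: … ; elements.update(new_elements)
def pvAInit (generators : List Int) (check_limit : Int) : PySem.Set Int :=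
  generators.foldl
    (fun elements gen => PySem.Set.update elements (pvAGenNew elements check_limit gen))
    (PySem.Set.add PySem.Set.empty 0)

-- one round of A's closure loop: (new, changed)
def pvANew (elements : PySem.Set Int) (check_limit : Int) : PySem.Set Int × Bool :=
  elements.foldl (fun acc a =>
    elements.foldl (fun acc b =>
      if a + b ≤ check_limit ∧ a + b ∉ elements then (PySem.Set.add acc.1 (a + b), true) else acc)
      acc)
    (PySem.Set.empty, false)

-- A's 'while changed' loop; the fuel only makes it total: each changed round strictly grows
-- the set inside {0..check_limit}, so (check_limit+1).toNat + 1 rounds are proved sufficient below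
def pvAClosure (check_limit : Int) : Nat → PySem.Set Int → PySem.Set Int
  | 0, elements => elements
  | fuel + 1, elements =>
    let p := pvANew elements check_limit
    if p.2 then pvAClosure check_limit fuel (PySem.Set.update elements p.1) else elements

def make_semigroup (generators : List Int) (check_limit : Int) : List Int :=
  let g := pvGcdReduce generators
  if g ≠ 1 then []   -- Python raises ValueError here; excluded by Pre_
  else
    let elements := pvAClosure check_limit ((check_limit + 1).toNat + 1)
                      (pvAInit generators check_limit)
    PySem.List.sorted (elements.filter (fun e => e ≤ check_limit)) (fun x => x) false

-- ===== PORT B =====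
-- the sieve list: reach = [True]; for e in 1..check_limit: reach.append(any(...))
-- (reach[e - gen] is only read under the guard 0 < gen <= e, so the index is always in range)
def pvBReach (generators : List Int) (check_limit : Int) : List Bool :=
  (PySem.List.pyRange 1 (check_limit + 1) 1).foldl
    (fun reach e => reach ++ [generators.any (fun gen =>
      decide (0 < gen) && decide (gen ≤ e) && PySem.List.pyGetD reach (e - gen) false)])
    [true]

def make_semigroup_alt (generators : List Int) (check_limit : Int) : List Int :=
  let g := pvGcdReduce generators
  if g ≠ 1 then []   -- Python raises ValueError here; excluded by Pre_
  else
    let reach := pvBReach generators check_limit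
    (PySem.List.pyRange 0 (check_limit + 1) 1).filter
      (fun e => PySem.List.pyGetD reach e false)

-- ===== PRECONDITION & SPEC =====
-- Pre_ excludes exactly the inputs where Python A raises: the empty list (TypeError in reduce),
-- gcd ≠ 1 (A's explicit ValueError), and a 0 generator with check_limit ≥ 0 (ZeroDivisionError
-- in '(check_limit - e) // gen'; with check_limit < 0 that loop body never runs).
def Pre_make_semigroup (generators : List Int) (check_limit : Int) : Prop :=
  generators ≠ [] ∧ pvGcdReduce generators = 1 ∧ (0 ∈ generators → check_limit < 0)
instance (generators : List Int) (check_limit : Int) : Decidable (Pre_make_semigroup generators check_limit) := by unfold Pre_make_semigroup; infer_instance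
def pvWitness_make_semigroup : List Int × Int := ([2, 3], 10)

def Spec_make_semigroup (generators : List Int) (check_limit : Int) (out : List Int) : Prop := out = make_semigroup_alt generators check_limit
instance (generators : List Int) (check_limit : Int) (out : List Int) : Decidable (Spec_make_semigroup generators check_limit out) := by unfold Spec_make_semigroup; infer_instance

-- ===== CLAIM (what is proved, stated in full; the proofs are below) =====
def Claim_equal_make_semigroup : Prop := ∀ (generators : List Int) (check_limit : Int), Dom_make_semigroup generators check_limit → Pre_make_semigroup generators check_limit → Spec_make_semigroup generators check_limit (make_semigroup generators check_limit)

-- ===== LEMMAS AND PROOFS =====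

-- the mathematical reachability predicate both programs compute:
-- sums of positive generators staying ≤ check_limit
inductive pvReach (generators : List Int) (check_limit : Int) : Int → Prop
  | zero : pvReach generators check_limit 0
  | step {e g : Int} : pvReach generators check_limit e → g ∈ generators → 0 < g →
      e + g ≤ check_limit → pvReach generators check_limit (e + g)

lemma pvReach_nonneg {gens : List Int} {L x : Int} (h : pvReach gens L x) : 0 ≤ x := by
  induction h with
  | zero => omega
  | step _ _ hg _ ih => omega

lemma pvReach_le {gens : List Int} {L x : Int} (h : pvReach gens L x) : x ≤ max L 0 := by
  cases h with
  | zero => omega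
  | step he hg hpos hle => omega

lemma pvReach_add {gens : List Int} {L a b : Int} (ha : pvReach gens L a)
    (hb : pvReach gens L b) (hle : a + b ≤ L) : pvReach gens L (a + b) := by
  induction hb with
  | zero => simpa using ha
  | @step e g he hg hpos hgl ih =>
    have hpe : pvReach gens L (a + e) := ih (by omega)
    have := pvReach.step hpe hg hpos (show a + e + g ≤ L by omega)
    simpa [add_assoc] using this

lemma pvReach_add_mul {gens : List Int} {L e g : Int} (he : pvReach gens L e)
    (hg : g ∈ gens) (hpos : 0 < g) : ∀ k : Nat, e + k * g ≤ L → pvReach gens L (e + k * g) := by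
  intro k
  induction k with
  | zero => intro _; simpa using he
  | succ k ih =>
    intro hle
    have hk : e + k * g ≤ L := by push_cast at hle ⊢; nlinarith
    have h1 : pvReach gens L (e + k * g) := ih hk
    have := pvReach.step h1 hg hpos (show e + k * g + g ≤ L by push_cast at hle ⊢; nlinarith)
    have heq : e + ((k : Nat) + 1 : Nat) * g = e + k * g + g := by push_cast; ring
    rwa [heq]

lemma pvReach_succ_iff {gens : List Int} {L x : Int} (hx : 0 < x) (hxL : x ≤ L) :
    pvReach gens L x ↔ ∃ g ∈ gens, 0 < g ∧ g ≤ x ∧ pvReach gens L (x - g) := by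
  constructor
  · intro h
    cases h with
    | zero => omega
    | @step e g he hg hpos hle =>
      exact ⟨g, hg, hpos, by have := pvReach_nonneg he; omega, by simpa using he⟩
  · rintro ⟨g, hg, hpos, hgx, hr⟩
    have := pvReach.step hr hg hpos (show x - g + g ≤ L by omega)
    simpa using this

-- ---- A side: generic monotonicity ----
lemma foldl_set_mono {β : Type} (l : List β) (f : PySem.Set Int → β → PySem.Set Int)
    (h : ∀ s b, s ⊆ f s b) (s : PySem.Set Int) : s ⊆ l.foldl f s := by
  induction l generalizing s with
  | nil => exact fun _ hx => hx
  | cons b bs ih => exact fun x hx => ih (f s b) (h s b hx)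

lemma subset_set_add (s : PySem.Set Int) (x : Int) : s ⊆ PySem.Set.add s x := by
  intro y hy; rw [PySem.Set.mem_add]; exact Or.inl hy

-- ---- A side: first phase ----
lemma pvAGenNew_aux (E : PySem.Set Int) (L g x : Int) : ∀ (es : List Int) (acc : PySem.Set Int),
    x ∈ es.foldl (fun ne e =>
      if e ∈ E then
        (PySem.List.pyRange 1 (PySem.Int.floordiv (L - e) g + 1) 1).foldl
          (fun ne k => PySem.Set.add ne (e + k * g)) ne
      else ne) acc →
    x ∈ acc ∨ ∃ e, e ∈ E ∧ e ∈ es ∧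
      ∃ k, k ∈ PySem.List.pyRange 1 (PySem.Int.floordiv (L - e) g + 1) 1 ∧ x = e + k * g := by
  intro es
  induction es with
  | nil => intro acc hx; exact Or.inl hx
  | cons e es ih =>
    intro acc hx
    rcases ih _ hx with h | ⟨e', he', hes, k, hk, hxe⟩
    · by_cases hmem : e ∈ E
      · simp only [hmem, if_pos] at h
        rw [PySem.Set.mem_foldl_add] at h
        rcases h with h | ⟨k, hk, hxe⟩
        · exact Or.inl h
        · exact Or.inr ⟨e, hmem, List.mem_cons_self, k, hk, hxe⟩
      · simp only [hmem, if_neg, not_false_iff] at h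
        exact Or.inl h
    · exact Or.inr ⟨e', he', List.mem_cons_of_mem _ hes, k, hk, hxe⟩

lemma floordiv_zero_right (a : Int) : PySem.Int.floordiv a 0 = 0 := by
  simp [PySem.Int.floordiv]

lemma pvAGenNew_sound {E : PySem.Set Int} {L g x : Int} (hx : x ∈ pvAGenNew E L g) :
    0 < g ∧ ∃ e ∈ E, 0 ≤ e ∧ ∃ k : Int, 1 ≤ k ∧ x = e + k * g ∧ x ≤ L := by
  unfold pvAGenNew at hx
  rcases pvAGenNew_aux E L g x _ _ hx with h | ⟨e, heE, hes, k, hk, hxe⟩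
  · simp [PySem.Set.empty] at h
  · rw [PySem.List.mem_pyRange_one] at hes hk
    have hk1 : 1 ≤ k := hk.1
    have hkfd : k ≤ PySem.Int.floordiv (L - e) g := by omega
    have he0 : 0 ≤ e := hes.1
    have heL : e ≤ L := by omega
    have hgpos : 0 < g := by
      rcases lt_trichotomy g 0 with hg | hg | hg
      · have hdm := PySem.Int.floordiv_mul_add_mod (L - e) g
        have hmb := PySem.Int.mod_neg_bounds (L - e) hg
        have h1 : PySem.Int.floordiv (L - e) g * g ≤ 1 * g := by
          apply mul_le_mul_of_nonpos_right _ (le_of_lt hg)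
          omega
        nlinarith
      · rw [hg, floordiv_zero_right] at hkfd; omega
      · exact hg
    have hfd : PySem.Int.floordiv (L - e) g * g ≤ L - e := by
      have hdm := PySem.Int.floordiv_mul_add_mod (L - e) g
      have := PySem.Int.mod_nonneg (L - e) hgpos
      omega
    have hxL : x ≤ L := by
      have : k * g ≤ PySem.Int.floordiv (L - e) g * g :=
        mul_le_mul_of_nonneg_right hkfd (le_of_lt hgpos)
      omega
    exact ⟨hgpos, e, heE, he0, k, hk1, hxe, hxL⟩

lemma gen_mem_pvAGenNew {E : PySem.Set Int} {L g : Int} (h0 : 0 ∈ E) (hpos : 0 < g)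
    (hgL : g ≤ L) : g ∈ pvAGenNew E L g := by
  unfold pvAGenNew
  have hLpos : (0 : Int) < L + 1 := by omega
  rw [PySem.List.pyRange_one_cons hLpos, List.foldl_cons]
  apply foldl_set_mono
  · intro s b
    by_cases hmem : b ∈ E
    · simp only [hmem, if_pos]
      apply foldl_set_mono
      intro s' k
      exact subset_set_add s' (b + k * g)
    · simp only [hmem, if_neg, not_false_iff]
      exact fun x hx => hx
  · simp only [h0, if_pos]
    rw [PySem.Set.mem_foldl_add]
    right
    refine ⟨1, ?_, by ring⟩
    rw [PySem.List.mem_pyRange_one]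
    have hfd : 1 ≤ PySem.Int.floordiv (L - 0) g := by
      rw [PySem.Int.le_floordiv_iff_mul_le]
      · omega
      · exact hpos
    omega

lemma pvAInit_aux (gens : List Int) (L : Int) : ∀ (gs : List Int), (∀ g ∈ gs, g ∈ gens) →
    ∀ E : PySem.Set Int, E.Nodup → 0 ∈ E → (∀ x ∈ E, pvReach gens L x) →
    (gs.foldl (fun elements gen => PySem.Set.update elements (pvAGenNew elements L gen)) E).Nodup ∧
    0 ∈ gs.foldl (fun elements gen => PySem.Set.update elements (pvAGenNew elements L gen)) E ∧
    (∀ x ∈ gs.foldl (fun elements gen => PySem.Set.update elements (pvAGenNew elements L gen)) E,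
      pvReach gens L x) ∧
    (∀ g ∈ gs, 0 < g → g ≤ L →
      g ∈ gs.foldl (fun elements gen => PySem.Set.update elements (pvAGenNew elements L gen)) E) ∧
    E ⊆ gs.foldl (fun elements gen => PySem.Set.update elements (pvAGenNew elements L gen)) E := by
  intro gs
  induction gs with
  | nil =>
    intro _ E hnd h0 hr
    exact ⟨hnd, h0, hr, by simp, fun x hx => hx⟩
  | cons gen gs ih =>
    intro hsub E hnd h0 hr
    have hgen : gen ∈ gens := hsub gen List.mem_cons_self
    have hnd' : (PySem.Set.update E (pvAGenNew E L gen)).Nodup := PySem.Set.nodup_update _ _ hnd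
    have h0' : 0 ∈ PySem.Set.update E (pvAGenNew E L gen) := by
      rw [PySem.Set.mem_update]; exact Or.inl h0
    have hr' : ∀ x ∈ PySem.Set.update E (pvAGenNew E L gen), pvReach gens L x := by
      intro x hx
      rw [PySem.Set.mem_update] at hx
      rcases hx with hx | hx
      · exact hr x hx
      · obtain ⟨hpos, e, heE, he0, k, hk1, hxe, hxL⟩ := pvAGenNew_sound hx
        have hcast : ((k.toNat : Int)) = k := by omega
        have := pvReach_add_mul (hr e heE) hgen hpos k.toNat (by rw [hcast]; omega)
        rwa [hcast, ← hxe] at this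
    obtain ⟨Fnd, F0, Fr, Fg, Fsub⟩ := ih (fun g hg => hsub g (List.mem_cons_of_mem _ hg)) _ hnd' h0' hr'
    rw [List.foldl_cons]
    refine ⟨Fnd, F0, Fr, ?_, ?_⟩
    · intro g hg hgpos hgL
      rcases List.mem_cons.mp hg with rfl | hg
      · apply Fsub
        rw [PySem.Set.mem_update]
        exact Or.inr (gen_mem_pvAGenNew h0 hgpos hgL)
      · exact Fg g hg hgpos hgL
    · intro x hx
      apply Fsub
      rw [PySem.Set.mem_update]
      exact Or.inl hx

lemma pvAInit_inv (gens : List Int) (L : Int) :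
    (pvAInit gens L).Nodup ∧ 0 ∈ pvAInit gens L ∧
    (∀ g ∈ gens, 0 < g → g ≤ L → g ∈ pvAInit gens L) ∧
    (∀ x ∈ pvAInit gens L, pvReach gens L x) := by
  have h := pvAInit_aux gens L gens (fun g hg => hg) (PySem.Set.add PySem.Set.empty 0)
    (by simp [PySem.Set.add, PySem.Set.empty, PySem.Set.contains])
    (by simp [PySem.Set.add, PySem.Set.empty, PySem.Set.contains])
    (by
      intro x hx
      simp [PySem.Set.add, PySem.Set.empty, PySem.Set.contains] at hx
      subst hx
      exact pvReach.zero)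
  unfold pvAInit
  exact ⟨h.1, h.2.1, h.2.2.2.1, h.2.2.1⟩

-- ---- A side: one closure round ----
lemma set_add_ne_nil (s : PySem.Set Int) (x : Int) : PySem.Set.add s x ≠ [] := by
  rw [PySem.Set.add_eq_ite]
  split_ifs with h
  · intro hnil; subst hnil; simp at h
  · simp

lemma pvANew_inner (a L : Int) (E : PySem.Set Int) : ∀ (bs : List Int) (acc : PySem.Set Int × Bool),
    (∀ x, x ∈ (bs.foldl (fun acc b => if a + b ≤ L ∧ a + b ∉ E then (PySem.Set.add acc.1 (a + b), true) else acc) acc).1 →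
        x ∈ acc.1 ∨ ∃ b ∈ bs, x = a + b ∧ x ≤ L ∧ x ∉ E) ∧
    ((bs.foldl (fun acc b => if a + b ≤ L ∧ a + b ∉ E then (PySem.Set.add acc.1 (a + b), true) else acc) acc).2 = false →
        acc.2 = false ∧ ∀ b ∈ bs, ¬(a + b ≤ L ∧ a + b ∉ E)) ∧
    ((acc.2 = true → acc.1 ≠ []) →
        (bs.foldl (fun acc b => if a + b ≤ L ∧ a + b ∉ E then (PySem.Set.add acc.1 (a + b), true) else acc) acc).2 = true →
        (bs.foldl (fun acc b => if a + b ≤ L ∧ a + b ∉ E then (PySem.Set.add acc.1 (a + b), true) else acc) acc).1 ≠ []) := by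
  intro bs
  induction bs with
  | nil =>
    intro acc
    exact ⟨fun x hx => Or.inl hx, fun h => ⟨h, by simp⟩, fun h ht => h ht⟩
  | cons b bs ih =>
    intro acc
    by_cases hc : a + b ≤ L ∧ a + b ∉ E
    · obtain ⟨ih1, ih2, ih3⟩ := ih (PySem.Set.add acc.1 (a + b), true)
      simp only [List.foldl_cons, hc]
      refine ⟨?_, ?_, ?_⟩
      · intro x hx
        rcases ih1 x hx with hx' | ⟨b', hb', hx'⟩
        · rw [PySem.Set.mem_add] at hx'
          rcases hx' with hx' | rfl
          · exact Or.inl hx'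
          · exact Or.inr ⟨b, List.mem_cons_self, rfl, hc.1, hc.2⟩
        · exact Or.inr ⟨b', List.mem_cons_of_mem _ hb', hx'⟩
      · intro hf
        exact absurd ((ih2 hf).1) (by simp)
      · intro _ ht
        exact ih3 (fun _ => set_add_ne_nil _ _) ht
    · obtain ⟨ih1, ih2, ih3⟩ := ih acc
      simp only [List.foldl_cons, hc, if_neg, not_false_iff]
      refine ⟨?_, ?_, ?_⟩
      · intro x hx
        rcases ih1 x hx with hx' | ⟨b', hb', hx'⟩
        · exact Or.inl hx'
        · exact Or.inr ⟨b', List.mem_cons_of_mem _ hb', hx'⟩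
      · intro hf
        obtain ⟨h1, h2⟩ := ih2 hf
        refine ⟨h1, ?_⟩
        intro b' hb'
        rcases List.mem_cons.mp hb' with rfl | hb'
        · exact hc
        · exact h2 b' hb'
      · exact ih3

lemma pvANew_outer (L : Int) (E : PySem.Set Int) : ∀ (as : List Int) (acc : PySem.Set Int × Bool),
    (∀ x, x ∈ (as.foldl (fun acc a => E.foldl (fun acc b => if a + b ≤ L ∧ a + b ∉ E then (PySem.Set.add acc.1 (a + b), true) else acc) acc) acc).1 →
        x ∈ acc.1 ∨ ∃ a ∈ as, ∃ b ∈ E, x = a + b ∧ x ≤ L ∧ x ∉ E) ∧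
    ((as.foldl (fun acc a => E.foldl (fun acc b => if a + b ≤ L ∧ a + b ∉ E then (PySem.Set.add acc.1 (a + b), true) else acc) acc) acc).2 = false →
        acc.2 = false ∧ ∀ a ∈ as, ∀ b ∈ E, ¬(a + b ≤ L ∧ a + b ∉ E)) ∧
    ((acc.2 = true → acc.1 ≠ []) →
        (as.foldl (fun acc a => E.foldl (fun acc b => if a + b ≤ L ∧ a + b ∉ E then (PySem.Set.add acc.1 (a + b), true) else acc) acc) acc).2 = true →
        (as.foldl (fun acc a => E.foldl (fun acc b => if a + b ≤ L ∧ a + b ∉ E then (PySem.Set.add acc.1 (a + b), true) else acc) acc) acc).1 ≠ []) := by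
  intro as
  induction as with
  | nil =>
    intro acc
    exact ⟨fun x hx => Or.inl hx, fun h => ⟨h, by simp⟩, fun h ht => h ht⟩
  | cons a as ih =>
    intro acc
    obtain ⟨in1, in2, in3⟩ := pvANew_inner a L E E acc
    obtain ⟨ih1, ih2, ih3⟩ := ih (E.foldl (fun acc b => if a + b ≤ L ∧ a + b ∉ E then (PySem.Set.add acc.1 (a + b), true) else acc) acc)
    rw [List.foldl_cons]
    refine ⟨?_, ?_, ?_⟩
    · intro x hx
      rcases ih1 x hx with hx' | ⟨a', ha', hx'⟩
      · rcases in1 x hx' with hx'' | ⟨b, hb, hx''⟩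
        · exact Or.inl hx''
        · exact Or.inr ⟨a, List.mem_cons_self, b, hb, hx''⟩
      · exact Or.inr ⟨a', List.mem_cons_of_mem _ ha', hx'⟩
    · intro hf
      obtain ⟨h1, h2⟩ := ih2 hf
      obtain ⟨h3, h4⟩ := in2 h1
      refine ⟨h3, ?_⟩
      intro a' ha'
      rcases List.mem_cons.mp ha' with rfl | ha'
      · exact h4
      · exact h2 a' ha'
    · intro hne
      exact ih3 (in3 hne)

lemma pvANew_sound {E : PySem.Set Int} {L x : Int} (hx : x ∈ (pvANew E L).1) :
    (∃ a ∈ E, ∃ b ∈ E, x = a + b) ∧ x ≤ L ∧ x ∉ E := by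
  unfold pvANew at hx
  rcases (pvANew_outer L E E (PySem.Set.empty, false)).1 x hx with h | ⟨a, ha, b, hb, hx', hL, hnE⟩
  · simp [PySem.Set.empty] at h
  · exact ⟨⟨a, ha, b, hb, hx'⟩, hL, hnE⟩

lemma pvANew_closed {E : PySem.Set Int} {L : Int} (h : (pvANew E L).2 = false) :
    ∀ a ∈ E, ∀ b ∈ E, a + b ≤ L → a + b ∈ E := by
  unfold pvANew at h
  have := ((pvANew_outer L E E (PySem.Set.empty, false)).2.1 h).2
  intro a ha b hb hle
  by_contra hmem
  exact this a ha b hb ⟨hle, hmem⟩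

lemma pvANew_ne_nil {E : PySem.Set Int} {L : Int} (h : (pvANew E L).2 = true) :
    (pvANew E L).1 ≠ [] := by
  unfold pvANew at h ⊢
  exact (pvANew_outer L E E (PySem.Set.empty, false)).2.2 (by simp) h

-- distinct integers in {0..max L 0} are at most (max L 0 + 1).toNat many
lemma length_le_of_nodup_bounded (l : List Int) (M : Int) (hnd : l.Nodup)
    (hbd : ∀ x ∈ l, 0 ≤ x ∧ x ≤ M) : l.length ≤ (M + 1).toNat := by
  have hs : l ⊆ PySem.List.pyRange 0 (M + 1) 1 := by
    intro x hx
    rw [PySem.List.mem_pyRange_one]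
    have := hbd x hx
    omega
  have h1 : l.toFinset.card = l.length := List.toFinset_card_of_nodup hnd
  have h2 : l.toFinset ⊆ (PySem.List.pyRange 0 (M + 1) 1).toFinset := by
    intro x hx; rw [List.mem_toFinset] at *; exact hs hx
  have h3 := Finset.card_le_card h2
  have h4 := (PySem.List.pyRange 0 (M + 1) 1).toFinset_card_le
  have h5 : (PySem.List.pyRange 0 (M + 1) 1).length = (M + 1 - 0).toNat :=
    PySem.List.length_pyRange_one 0 (M + 1)
  omega

lemma update_length_lt {E : PySem.Set Int} {xs : List Int} {x : Int}
    (hx : x ∈ xs) (hnx : x ∉ E) : E.length < (PySem.Set.update E xs).length := by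
  rw [PySem.Set.update_eq_append_filter, List.length_append]
  have hmem : x ∈ (PySem.Set.ofList xs).filter (fun y => !(PySem.Set.contains E y)) := by
    rw [List.mem_filter]
    constructor
    · rw [PySem.Set.mem_ofList]; exact hx
    · simp only [Bool.not_eq_true']
      rw [← Bool.not_eq_true]
      intro hc
      rw [PySem.Set.contains_iff] at hc
      exact hnx hc
  have : ((PySem.Set.ofList xs).filter (fun y => !(PySem.Set.contains E y))).length ≠ 0 := by
    intro h0
    rw [List.length_eq_zero_iff] at h0
    rw [h0] at hmem
    simp at hmem
  omega

-- ---- A side: the closure loop reaches the fixed point and computes pvReach ----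
lemma pvAClosure_spec (gens : List Int) (L : Int) : ∀ (fuel : Nat) (E : PySem.Set Int),
    E.Nodup → 0 ∈ E → (∀ g ∈ gens, 0 < g → g ≤ L → g ∈ E) →
    (∀ x ∈ E, pvReach gens L x) →
    (max L 0 + 1).toNat + 1 ≤ fuel + E.length →
    (pvAClosure L fuel E).Nodup ∧ (∀ x, x ∈ pvAClosure L fuel E ↔ pvReach gens L x) := by
  intro fuel
  induction fuel with
  | zero =>
    intro E hnd h0 hg hr hfuel
    exfalso
    have := length_le_of_nodup_bounded E (max L 0) hnd
      (fun x hx => ⟨pvReach_nonneg (hr x hx), pvReach_le (hr x hx)⟩)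
    omega
  | succ fuel ih =>
    intro E hnd h0 hg hr hfuel
    by_cases hp : (pvANew E L).2 = true
    · have hstep : pvAClosure L (fuel + 1) E = pvAClosure L fuel (PySem.Set.update E (pvANew E L).1) := by
        simp only [pvAClosure, hp, if_pos]
      rw [hstep]
      have hsub : E ⊆ PySem.Set.update E (pvANew E L).1 := by
        intro y hy; rw [PySem.Set.mem_update]; exact Or.inl hy
      have hlen : E.length < (PySem.Set.update E (pvANew E L).1).length := by
        obtain ⟨w, hw⟩ := List.exists_mem_of_ne_nil _ (pvANew_ne_nil hp)
        exact update_length_lt hw (pvANew_sound hw).2.2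
      apply ih
      · exact PySem.Set.nodup_update _ _ hnd
      · exact hsub h0
      · intro g hgm hgp hgl; exact hsub (hg g hgm hgp hgl)
      · intro x hx
        rw [PySem.Set.mem_update] at hx
        rcases hx with hx | hx
        · exact hr x hx
        · obtain ⟨⟨a, ha, b, hb, rfl⟩, hle, _⟩ := pvANew_sound hx
          exact pvReach_add (hr a ha) (hr b hb) hle
      · omega
    · rw [Bool.not_eq_true] at hp
      have hstop : pvAClosure L (fuel + 1) E = E := by
        simp only [pvAClosure, hp, Bool.false_eq_true, if_false]
      rw [hstop]
      refine ⟨hnd, ?_⟩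
      intro x
      constructor
      · exact hr x
      · intro hx
        induction hx with
        | zero => exact h0
        | @step e g he hgm hgp hle ihe =>
          have heE := ihe
          have he0 := pvReach_nonneg he
          have hgE : g ∈ E := hg g hgm hgp (by omega)
          exact pvANew_closed hp e heE g hgE hle

-- ---- B side: the sieve list computes pvReach ----
lemma pvBReach_partial (gens : List Int) (L : Int) : ∀ n : Nat, (n : Int) ≤ L →
    ((PySem.List.pyRange 1 ((n : Int) + 1) 1).foldl
      (fun reach e => reach ++ [gens.any (fun gen =>
        decide (0 < gen) && decide (gen ≤ e) && PySem.List.pyGetD reach (e - gen) false)])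
      [true]).length = n + 1 ∧
    ∀ i : Nat, i ≤ n →
      (((PySem.List.pyRange 1 ((n : Int) + 1) 1).foldl
        (fun reach e => reach ++ [gens.any (fun gen =>
          decide (0 < gen) && decide (gen ≤ e) && PySem.List.pyGetD reach (e - gen) false)])
        [true])[i]? = some true ↔ pvReach gens L (i : Int)) := by
  intro n
  induction n with
  | zero =>
    intro _
    have hnil : PySem.List.pyRange 1 ((0 : Nat) + 1) 1 = [] := by
      apply PySem.List.pyRange_one_eq_nil; norm_num
    rw [hnil]
    simp only [List.foldl_nil]
    refine ⟨by simp, ?_⟩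
    intro i hi
    interval_cases i
    simp only [List.getElem?_cons_zero, Nat.cast_zero]
    constructor
    · intro _; exact pvReach.zero
    · intro _; trivial
  | succ n ihn =>
    intro hn1
    have hn : (n : Int) ≤ L := by push_cast at hn1 ⊢; omega
    obtain ⟨ihlen, ihval⟩ := ihn hn
    have hcast : ((n + 1 : Nat) : Int) + 1 = ((n : Int) + 1) + 1 := by push_cast; ring
    have hsplit : PySem.List.pyRange 1 (((n + 1 : Nat) : Int) + 1) 1 =
        PySem.List.pyRange 1 ((n : Int) + 1) 1 ++ [(n : Int) + 1] := by
      rw [hcast]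
      exact PySem.List.pyRange_one_succ_right (by omega)
    rw [hsplit, List.foldl_append]
    set r := (PySem.List.pyRange 1 ((n : Int) + 1) 1).foldl
      (fun reach e => reach ++ [gens.any (fun gen =>
        decide (0 < gen) && decide (gen ≤ e) && PySem.List.pyGetD reach (e - gen) false)])
      [true] with hr
    simp only [List.foldl_cons, List.foldl_nil]
    constructor
    · simp [List.length_append, ihlen]
    · intro i hi
      rcases Nat.lt_or_ge i (n + 1) with hilt | hige
      · rw [List.getElem?_append_left (by omega : i < r.length)]
        exact ihval i (by omega)
      · have hieq : i = n + 1 := by omega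
        subst hieq
        rw [List.getElem?_append_right (by omega : r.length ≤ n + 1)]
        have : n + 1 - r.length = 0 := by omega
        rw [this]
        simp only [List.getElem?_cons_zero, Option.some.injEq]
        have hpos : (0 : Int) < ((n + 1 : Nat) : Int) := by push_cast; omega
        rw [pvReach_succ_iff hpos hn1, List.any_eq_true]
        push_cast
        constructor
        · rintro ⟨gen, hgen, hband⟩
          simp only [Bool.and_eq_true, decide_eq_true_eq] at hband
          obtain ⟨⟨hgp, hgle⟩, hget⟩ := hband
          refine ⟨gen, hgen, hgp, hgle, ?_⟩
          have hj0 : (0 : Int) ≤ (n : Int) + 1 - gen := by omega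
          have hjlt : (n : Int) + 1 - gen < (r.length : Int) := by
            rw [ihlen]; push_cast; omega
          rw [PySem.List.pyGetD_eq_getElem r false hj0 hjlt] at hget
          have hjn : ((n : Int) + 1 - gen).toNat ≤ n := by omega
          have := (ihval _ hjn).mp (by
            rw [List.getElem?_eq_getElem (by omega : ((n : Int) + 1 - gen).toNat < r.length)]
            rw [hget])
          rwa [(by omega : (((((n : Int) + 1 - gen).toNat : Nat)) : Int) = (n : Int) + 1 - gen)] at this
        · rintro ⟨gen, hgen, hgp, hgle, hreach⟩
          refine ⟨gen, hgen, ?_⟩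
          simp only [Bool.and_eq_true, decide_eq_true_eq]
          refine ⟨⟨hgp, hgle⟩, ?_⟩
          have hj0 : (0 : Int) ≤ (n : Int) + 1 - gen := by omega
          have hjlt : (n : Int) + 1 - gen < (r.length : Int) := by
            rw [ihlen]; push_cast; omega
          rw [PySem.List.pyGetD_eq_getElem r false hj0 hjlt]
          have hjn : ((n : Int) + 1 - gen).toNat ≤ n := by omega
          have hsome := (ihval _ hjn).mpr (by
            rwa [(by omega : (((((n : Int) + 1 - gen).toNat : Nat)) : Int) = (n : Int) + 1 - gen)])
          rw [List.getElem?_eq_getElem (by omega : ((n : Int) + 1 - gen).toNat < r.length)] at hsome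
          exact Option.some.inj hsome

lemma pvBReach_getD (gens : List Int) (L x : Int) (h0 : 0 ≤ x) (hL : x ≤ L) :
    (PySem.List.pyGetD (pvBReach gens L) x false = true ↔ pvReach gens L x) := by
  have hL0 : (0 : Int) ≤ L := by omega
  have hcast : ((L.toNat : Int)) = L := by omega
  obtain ⟨hlen, hval⟩ := pvBReach_partial gens L L.toNat (by omega)
  rw [hcast] at hlen hval
  have hrw : pvBReach gens L = (PySem.List.pyRange 1 (L + 1) 1).foldl
      (fun reach e => reach ++ [gens.any (fun gen =>
        decide (0 < gen) && decide (gen ≤ e) && PySem.List.pyGetD reach (e - gen) false)])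
      [true] := rfl
  rw [hrw]
  set r := (PySem.List.pyRange 1 (L + 1) 1).foldl
      (fun reach e => reach ++ [gens.any (fun gen =>
        decide (0 < gen) && decide (gen ≤ e) && PySem.List.pyGetD reach (e - gen) false)])
      [true] with hrdef
  have hxlt : x < (r.length : Int) := by rw [hlen]; push_cast; omega
  rw [PySem.List.pyGetD_eq_getElem r false h0 hxlt]
  have hxn : x.toNat ≤ L.toNat := by omega
  have hx' := hval x.toNat hxn
  rw [(by omega : ((x.toNat : Nat) : Int) = x)] at hx'
  rw [← hx']
  rw [List.getElem?_eq_getElem (by omega : x.toNat < r.length)]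
  simp

lemma mem_alt_filter (gens : List Int) (L x : Int) :
    (x ∈ (PySem.List.pyRange 0 (L + 1) 1).filter
        (fun e => PySem.List.pyGetD (pvBReach gens L) e false) ↔
      pvReach gens L x ∧ x ≤ L) := by
  rw [List.mem_filter, PySem.List.mem_pyRange_one]
  constructor
  · rintro ⟨⟨hx0, hxlt⟩, hget⟩
    exact ⟨(pvBReach_getD gens L x hx0 (by omega)).mp hget, by omega⟩
  · rintro ⟨hr, hle⟩
    have h0 := pvReach_nonneg hr
    exact ⟨⟨h0, by omega⟩, (pvBReach_getD gens L x h0 hle).mpr hr⟩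

-- ===== VERDICT (by name: the statement is the Claim_ definition above) =====
theorem make_semigroup_spec : Claim_equal_make_semigroup := by
  intro gens L _ hpre
  unfold Spec_make_semigroup
  obtain ⟨_, hg1, _⟩ := hpre
  unfold make_semigroup make_semigroup_alt
  simp only [hg1, ne_eq, not_true_eq_false, if_false]
  obtain ⟨hnd0, h00, hgens0, hr0⟩ := pvAInit_inv gens L
  have hlenpos : 0 < (pvAInit gens L).length := List.length_pos_of_mem h00
  obtain ⟨hndC, hmemC⟩ := pvAClosure_spec gens L ((L + 1).toNat + 1) (pvAInit gens L)
    hnd0 h00 hgens0 hr0 (by omega)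
  refine PySem.List.sorted_eq_of_perm_of_pairwise_lt _ _ _ ?_ ?_
  · rw [List.perm_ext_iff_of_nodup
      (List.Nodup.filter _ (PySem.List.nodup_pyRange_one 0 (L + 1)))
      (List.Nodup.filter _ hndC)]
    intro x
    rw [mem_alt_filter, List.mem_filter, hmemC x]
    simp
  · exact List.Pairwise.filter _ (PySem.List.pairwise_lt_pyRange_one 0 (L + 1))
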